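-- pv_equiv track=rewrite | github.com/juaniarrigoni/Software-Engineering-Workshops | secundario_tp3.py | timestamp
-- ===== SOURCE A (Python) =====
-- def timestamp(linea):
--     idioma = ""
--     anterior = ""
--     for caracter in linea:
--         if anterior == "P" and caracter == "T":
--             idioma = "portugués"
--         if anterior == "E" and caracter == "S":
--             idioma = "español"
--         anterior = caracter
--     return idioma
-- ===== SOURCE B (Python) =====
-- def timestamp(linea):
--     pt = linea.rfind("PT")
--     es = linea.rfind("ES")
--     if pt == es:  # both are -1: neither marker occurs
--         return ""
--     return "portugués" if pt > es else "español"
-- ===== Notes on version B (the rewrite author's own statement) =====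
-- stated objective: simpler
-- what changed: Replaces the stateful char-by-char scan tracking the previous character with two rfind substring searches and a single comparison (later last occurrence of 'PT' vs 'ES' wins).
import Mathlib
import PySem

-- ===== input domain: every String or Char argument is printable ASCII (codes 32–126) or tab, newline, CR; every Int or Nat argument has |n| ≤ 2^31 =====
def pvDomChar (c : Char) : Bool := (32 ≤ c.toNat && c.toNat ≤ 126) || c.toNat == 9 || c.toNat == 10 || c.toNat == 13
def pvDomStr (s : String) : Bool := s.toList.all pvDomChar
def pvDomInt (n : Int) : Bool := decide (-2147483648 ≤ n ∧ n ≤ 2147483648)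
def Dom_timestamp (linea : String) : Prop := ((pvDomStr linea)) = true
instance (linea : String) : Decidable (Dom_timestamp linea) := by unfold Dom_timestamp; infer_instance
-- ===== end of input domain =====

-- B replaces A's stateful char-by-char scan with two rfind substring searches and one comparison (simpler decomposition, same cost).


-- ===== PORT A =====
-- Python's `anterior` is "" initially and a one-char string afterwards; ported as Option Char
-- (none = "", some c = the one-char string), with `anterior == "P"` becoming `prev = some 'P'`.
def timestampLoop : List Char → String → Option Char → String
  | [], idioma, _ => idioma
  | c :: rest, idioma, prev =>
    let i1 := if prev = some 'P' ∧ c = 'T' then "portugués" else idioma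
    let i2 := if prev = some 'E' ∧ c = 'S' then "español" else i1
    timestampLoop rest i2 (some c)

def timestamp (linea : String) : String :=
  timestampLoop linea.toList "" none

-- ===== PORT B =====
-- hand port of Python's str.rfind for a two-character needle "ab": the highest index at which
-- the adjacent pair (a,b) occurs, or -1 if it does not occur (exact on all strings).
def rfind2 (a b : Char) : List Char → Int
  | [] => -1
  | c :: rest =>
    match rest with
    | [] => -1
    | d :: _ =>
      let r := rfind2 a b rest
      if r = -1 then (if c = a ∧ d = b then 0 else -1) else r + 1

def timestamp_alt (linea : String) : String :=
  let pt := rfind2 'P' 'T' linea.toList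
  let es := rfind2 'E' 'S' linea.toList
  if pt = es then "" else if pt > es then "portugués" else "español"

-- ===== PRECONDITION & SPEC =====
def Spec_timestamp (linea : String) (out : String) : Prop := out = timestamp_alt linea
instance (linea : String) (out : String) : Decidable (Spec_timestamp linea out) := by unfold Spec_timestamp; infer_instance

-- ===== CLAIM (what is proved, stated in full; the proofs are below) =====
def Claim_equal_timestamp : Prop := ∀ (linea : String), Dom_timestamp linea → Spec_timestamp linea (timestamp linea)

-- ===== LEMMAS AND PROOFS =====

-- pair-scan reformulation of A's loop: scan adjacent pairs of l, last match wins
def pairScan : List Char → String → String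
  | [], idioma => idioma
  | c :: rest, idioma =>
    match rest with
    | [] => idioma
    | d :: _ =>
      pairScan rest (if c = 'E' ∧ d = 'S' then "español"
                     else if c = 'P' ∧ d = 'T' then "portugués" else idioma)

lemma rfind2_cons2 (a b c d : Char) (t : List Char) :
    rfind2 a b (c :: d :: t) =
      (if rfind2 a b (d :: t) = -1 then (if c = a ∧ d = b then 0 else -1)
       else rfind2 a b (d :: t) + 1) := rfl

lemma pairScan_cons2 (c d : Char) (t : List Char) (idioma : String) :
    pairScan (c :: d :: t) idioma =
      pairScan (d :: t) (if c = 'E' ∧ d = 'S' then "español"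
                         else if c = 'P' ∧ d = 'T' then "portugués" else idioma) := rfl

lemma rfind2_ge (a b : Char) : ∀ l : List Char, -1 ≤ rfind2 a b l := by
  intro l
  induction l with
  | nil => simp [rfind2]
  | cons c rest ih =>
    cases rest with
    | nil => simp [rfind2]
    | cons d t =>
      rw [rfind2_cons2]
      split_ifs <;> omega

lemma rfind2_ne : ∀ l : List Char,
    rfind2 'P' 'T' l ≠ rfind2 'E' 'S' l ∨
      (rfind2 'P' 'T' l = -1 ∧ rfind2 'E' 'S' l = -1) := by
  intro l
  induction l with
  | nil => simp [rfind2]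
  | cons c rest ih =>
    cases rest with
    | nil => simp [rfind2]
    | cons d t =>
      have hpt := rfind2_ge 'P' 'T' (d :: t)
      have hes := rfind2_ge 'E' 'S' (d :: t)
      rw [rfind2_cons2, rfind2_cons2]
      by_cases hES : c = 'E' ∧ d = 'S'
      · have hPT : ¬(c = 'P' ∧ d = 'T') := by
          rintro ⟨h1, _⟩; rw [hES.1] at h1; exact absurd h1 (by decide)
        rw [if_pos hES, if_neg hPT]
        split_ifs <;> omega
      · by_cases hPT : c = 'P' ∧ d = 'T'
        · rw [if_pos hPT, if_neg hES]
          split_ifs <;> omega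
        · rw [if_neg hES, if_neg hPT]
          split_ifs <;> omega

lemma timestampLoop_some : ∀ (cs : List Char) (p : Char) (idioma : String),
    timestampLoop cs idioma (some p) = pairScan (p :: cs) idioma := by
  intro cs
  induction cs with
  | nil => intro p idioma; simp [timestampLoop, pairScan]
  | cons c rest ih =>
    intro p idioma
    simp only [timestampLoop]
    rw [ih, pairScan_cons2]
    congr 1
    by_cases hES : p = 'E' ∧ c = 'S'
    · have hPT : ¬(p = 'P' ∧ c = 'T') := by
        rintro ⟨h1, _⟩; rw [hES.1] at h1; exact absurd h1 (by decide)
      have hPT' : ¬(some p = some 'P' ∧ c = 'T') := by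
        rintro ⟨h1, h2⟩; exact hPT ⟨Option.some.inj h1, h2⟩
      have hES' : some p = some 'E' ∧ c = 'S' := ⟨by rw [hES.1], hES.2⟩
      rw [if_pos hES, if_neg hPT', if_pos hES']
    · by_cases hPT : p = 'P' ∧ c = 'T'
      · have hES' : ¬(some p = some 'E' ∧ c = 'S') := by
          rintro ⟨h1, h2⟩; exact hES ⟨Option.some.inj h1, h2⟩
        have hPT' : some p = some 'P' ∧ c = 'T' := ⟨by rw [hPT.1], hPT.2⟩
        rw [if_neg hES, if_pos hPT, if_pos hPT', if_neg hES']
      · have hES' : ¬(some p = some 'E' ∧ c = 'S') := by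
          rintro ⟨h1, h2⟩; exact hES ⟨Option.some.inj h1, h2⟩
        have hPT' : ¬(some p = some 'P' ∧ c = 'T') := by
          rintro ⟨h1, h2⟩; exact hPT ⟨Option.some.inj h1, h2⟩
        rw [if_neg hES, if_neg hPT, if_neg hPT', if_neg hES']

lemma timestamp_alt_eq (l : String) :
    timestamp_alt l =
      (if rfind2 'P' 'T' l.toList = rfind2 'E' 'S' l.toList then ""
       else if rfind2 'P' 'T' l.toList > rfind2 'E' 'S' l.toList then "portugués" else "español") := rfl

lemma pairScan_eq : ∀ (l : List Char) (idioma : String),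
    pairScan l idioma =
      (if rfind2 'P' 'T' l = -1 ∧ rfind2 'E' 'S' l = -1 then idioma
       else if rfind2 'P' 'T' l > rfind2 'E' 'S' l then "portugués" else "español") := by
  intro l
  induction l with
  | nil => intro idioma; simp [pairScan, rfind2]
  | cons c rest ih =>
    cases rest with
    | nil => intro idioma; simp [pairScan, rfind2]
    | cons d t =>
      intro idioma
      have hpt := rfind2_ge 'P' 'T' (d :: t)
      have hes := rfind2_ge 'E' 'S' (d :: t)
      rw [pairScan_cons2, ih, rfind2_cons2, rfind2_cons2]
      rcases rfind2_ne (d :: t) with hne | ⟨h1, h2⟩ <;>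
      · by_cases hES : c = 'E' ∧ d = 'S'
        · have hPT : ¬(c = 'P' ∧ d = 'T') := by
            rintro ⟨hx, _⟩; rw [hES.1] at hx; exact absurd hx (by decide)
          rw [if_pos hES, if_neg hPT]
          split_ifs <;> first | rfl | omega | (exfalso; omega) | tauto
        · by_cases hPT : c = 'P' ∧ d = 'T'
          · rw [if_pos hPT, if_neg hES]
            split_ifs <;> first | rfl | omega | (exfalso; omega) | tauto
          · rw [if_neg hES, if_neg hPT]
            split_ifs <;> first | rfl | omega | (exfalso; omega) | tauto

-- ===== VERDICT (by name: the statement is the Claim_ definition above) =====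
theorem timestamp_spec : Claim_equal_timestamp := by
  intro linea _
  unfold Spec_timestamp timestamp
  rw [timestamp_alt_eq]
  cases h : linea.toList with
  | nil => simp [timestampLoop, rfind2]
  | cons c rest =>
    have hstep : timestampLoop (c :: rest) "" none = pairScan (c :: rest) "" := by
      simp only [timestampLoop]
      rw [timestampLoop_some]
      all_goals (congr 1 <;> simp)
    rw [hstep, pairScan_eq]
    have hpt := rfind2_ge 'P' 'T' (c :: rest)
    have hes := rfind2_ge 'E' 'S' (c :: rest)
    rcases rfind2_ne (c :: rest) with hne | ⟨h1, h2⟩ <;>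
      split_ifs <;> first | rfl | omega | (exfalso; omega) | tauto
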